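-- pv_equiv track=rewrite | github.com/c-grigsby/analysis-of-algorithms | Graphs/PathFinder.py/pathFinder.py | getNodesVisited
-- ===== SOURCE A (Python) =====
-- def getNodesVisited(path, source):
--     nodesVisited = []
--     row = source[0]
--     column = source[1]
--     nodesVisited.append((row, column))
--
--     for move in path:
--         if move == "L":
--             column -= 1
--
--         elif move == "R":
--             column += 1
--
--         elif move == "U":
--             row -= 1
--
--         elif move == "D":
--             row += 1
--
--         nodesVisited.append((row, column))
--
--     return nodesVisited
-- ===== SOURCE B (Python) =====
-- from itertools import accumulate
--
-- def getNodesVisited(path, source):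
--     # Decompose the 2-D walk into two independent 1-D prefix-sum problems:
--     # the row coordinate only depends on U/D moves, the column only on L/R.
--     rows = list(accumulate(((m == "D") - (m == "U") for m in path),
--                            initial=source[0]))
--     cols = list(accumulate(((m == "R") - (m == "L") for m in path),
--                            initial=source[1]))
--     return list(zip(rows, cols))
-- ===== Notes on version B (the rewrite author's own statement) =====
-- stated objective: alternative
-- what changed: Decomposes the 2-D walk into two independent 1-D integer prefix-sum passes (rows from U/D, columns from L/R) and zips them, instead of A's single stateful loop that threads a (row,column) pair and appends after each move.
import Mathlib
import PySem

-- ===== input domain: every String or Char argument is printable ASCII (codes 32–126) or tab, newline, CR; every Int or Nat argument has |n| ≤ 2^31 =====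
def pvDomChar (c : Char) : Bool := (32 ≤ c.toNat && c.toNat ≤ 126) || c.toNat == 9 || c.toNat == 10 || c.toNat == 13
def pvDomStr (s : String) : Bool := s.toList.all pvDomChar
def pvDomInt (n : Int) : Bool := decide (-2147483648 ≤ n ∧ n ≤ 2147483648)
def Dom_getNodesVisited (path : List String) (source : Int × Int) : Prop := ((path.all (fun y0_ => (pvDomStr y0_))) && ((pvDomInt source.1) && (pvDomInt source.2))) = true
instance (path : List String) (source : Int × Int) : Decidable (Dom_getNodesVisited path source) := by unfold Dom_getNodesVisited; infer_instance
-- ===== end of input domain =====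

-- B decomposes the 2-D walk into two independent 1-D integer prefix-sum passes (rows, columns) zipped together, instead of A's single stateful (row,column) loop; same O(n) cost.


-- ===== PORT A =====
-- literal port of A: the loop state is (nodesVisited, row, column); each move updates row/column
-- by the if/elif chain and appends the new position.
def getNodesVisited (path : List String) (source : Int × Int) : List (Int × Int) :=
  let row := source.1
  let column := source.2
  let st := path.foldl (fun (st : List (Int × Int) × Int × Int) move =>
      let row := st.2.1
      let column := st.2.2
      let (row, column) :=
        if move = "L" then (row, column - 1)
        else if move = "R" then (row, column + 1)
        else if move = "U" then (row - 1, column)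
        else if move = "D" then (row + 1, column)
        else (row, column)
      (st.1 ++ [(row, column)], row, column))
    ([(row, column)], row, column)
  st.1

-- ===== PORT B =====
-- (m == "D") - (m == "U")  resp.  (m == "R") - (m == "L"): Python bool arithmetic, exact
def pvRowDelta (m : String) : Int := (if m = "D" then 1 else 0) - (if m = "U" then 1 else 0)
def pvColDelta (m : String) : Int := (if m = "R" then 1 else 0) - (if m = "L" then 1 else 0)

-- itertools.accumulate(ds, +, initial=init): the list of all prefix sums
def pvScan (init : Int) : List Int → List Int
  | [] => [init]
  | d :: ds => init :: pvScan (init + d) ds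

def getNodesVisited_alt (path : List String) (source : Int × Int) : List (Int × Int) :=
  let rows := pvScan source.1 (path.map pvRowDelta)
  let cols := pvScan source.2 (path.map pvColDelta)
  rows.zip cols

-- ===== PRECONDITION & SPEC =====
def Spec_getNodesVisited (path : List String) (source : Int × Int) (out : List (Int × Int)) : Prop := out = getNodesVisited_alt path source
instance (path : List String) (source : Int × Int) (out : List (Int × Int)) : Decidable (Spec_getNodesVisited path source out) := by unfold Spec_getNodesVisited; infer_instance

-- ===== CLAIM (what is proved, stated in full; the proofs are below) =====
def Claim_equal_getNodesVisited : Prop := ∀ (path : List String) (source : Int × Int), Dom_getNodesVisited path source → Spec_getNodesVisited path source (getNodesVisited path source)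

-- ===== LEMMAS AND PROOFS =====

-- A's if/elif chain is exactly "add the two 1-D deltas componentwise"
lemma step_eq_delta (move : String) (row column : Int) :
    (if move = "L" then (row, column - 1)
     else if move = "R" then (row, column + 1)
     else if move = "U" then (row - 1, column)
     else if move = "D" then (row + 1, column)
     else (row, column))
    = (row + pvRowDelta move, column + pvColDelta move) := by
  by_cases h1 : move = "L"
  · subst h1; simp [pvRowDelta, pvColDelta]; ring
  by_cases h2 : move = "R"
  · subst h2; simp [pvRowDelta, pvColDelta]
  by_cases h3 : move = "U"
  · subst h3; simp [pvRowDelta, pvColDelta]; ring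
  by_cases h4 : move = "D"
  · subst h4; simp [pvRowDelta, pvColDelta, h1]
  · simp [pvRowDelta, pvColDelta, h1, h2, h3, h4]

-- the zip of two scans always begins with the pair of their initial values
lemma zip_scan_head (a b : Int) (xs ys : List Int) :
    (pvScan a xs).zip (pvScan b ys)
      = (a, b) :: ((pvScan a xs).zip (pvScan b ys)).tail := by
  cases xs <;> cases ys <;> simp [pvScan]

-- loop invariant: A's fold from (acc, r, c) yields acc followed by the zipped scans (minus
-- the head (r, c), already recorded in acc)
lemma fold_eq_zip_scan (path : List String) (acc : List (Int × Int)) (r c : Int) :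
    (path.foldl (fun (st : List (Int × Int) × Int × Int) move =>
        let row := st.2.1
        let column := st.2.2
        let (row, column) :=
          if move = "L" then (row, column - 1)
          else if move = "R" then (row, column + 1)
          else if move = "U" then (row - 1, column)
          else if move = "D" then (row + 1, column)
          else (row, column)
        (st.1 ++ [(row, column)], row, column))
      (acc, r, c)).1
    = acc ++ ((pvScan r (path.map pvRowDelta)).zip (pvScan c (path.map pvColDelta))).tail := by
  induction path generalizing acc r c with
  | nil => simp [pvScan]
  | cons m rest ih =>
    simp only [List.foldl_cons, List.map_cons, pvScan, List.zip_cons_cons, List.tail_cons]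
    rw [step_eq_delta m r c, ih]
    rw [zip_scan_head (r + pvRowDelta m) (c + pvColDelta m)
        (rest.map pvRowDelta) (rest.map pvColDelta)]
    simp

-- ===== VERDICT (by name: the statement is the Claim_ definition above) =====
theorem getNodesVisited_spec : Claim_equal_getNodesVisited := by
  intro path source _
  unfold Spec_getNodesVisited getNodesVisited getNodesVisited_alt
  rw [fold_eq_zip_scan]
  rw [zip_scan_head source.1 source.2 (path.map pvRowDelta) (path.map pvColDelta)]
  simp
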